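-- pv_equiv track=rewrite | github.com/DeepanL/LeetCode_Problems | LeetC_loops_4.py | areAlmostEqual2
-- ===== SOURCE A (Python) =====
-- def areAlmostEqual2(s1: str, s2: str) -> bool:
--     if len(s1) != len(s2):
--         return False
--     if s1 == s2:
--         return True
--     a1, b1, a2, b2 = None, None, None, None
--     count = 0
--     for i in range(len(s1)):
--         if s1[i] != s2[i]:
--             if count == 0:
--                 a1 = s1[i]
--                 b1 = s2[i]
--                 count += 1
--             elif count == 1:
--                 a2 = s1[i]
--                 b2 = s2[i]
--                 count += 1
--                 if a1 == b2 and a2 == b1: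
--                     continue
--                 else:
--                     return False
--             else:
--                 return False
--     return count == 2
-- ===== SOURCE B (Python) =====
-- def areAlmostEqual2(s1: str, s2: str) -> bool:
--     if len(s1) != len(s2):
--         return False
--     if s1 == s2:
--         return True
--     mismatches = sum(a != b for a, b in zip(s1, s2))
--     return mismatches == 2 and sorted(s1) == sorted(s2)
-- ===== Notes on version B (the rewrite author's own statement) =====
-- stated objective: alternative
-- what changed: Replaces A's state machine that records and cross-checks the mismatched character pairs (count/a1/b1/a2/b2 with early-exit validation) by a multiset argument: count the mismatched positions and accept iff there are exactly two and sorted(s1) == sorted(s2); no characters from mismatch positions are ever compared against each other.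
import Mathlib
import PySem

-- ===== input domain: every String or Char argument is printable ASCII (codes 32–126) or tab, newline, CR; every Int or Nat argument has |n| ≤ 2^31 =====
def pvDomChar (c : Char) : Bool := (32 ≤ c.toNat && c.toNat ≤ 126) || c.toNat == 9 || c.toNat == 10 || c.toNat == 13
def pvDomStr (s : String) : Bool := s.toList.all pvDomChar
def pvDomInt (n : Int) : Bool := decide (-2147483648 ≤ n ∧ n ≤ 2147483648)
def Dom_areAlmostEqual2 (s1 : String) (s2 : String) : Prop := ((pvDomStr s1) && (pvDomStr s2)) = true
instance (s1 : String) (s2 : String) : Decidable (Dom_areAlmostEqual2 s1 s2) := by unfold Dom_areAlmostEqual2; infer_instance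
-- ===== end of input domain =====

-- B replaces A's cross-checking state machine by a multiset argument (mismatch count = 2
-- and sorted(s1) == sorted(s2)); objective: alternative algorithm, same result proved.

-- ===== PORT A =====
-- A's loop over i in range(len(s1)): since len(s1)=len(s2) at that point, it visits the
-- pairs (s1[i], s2[i]) in order; the mutable state (a1,b1,count) is threaded through
-- the recursion (a2,b2 are set and used immediately in the count==1 branch, as in A).
def areAlmostEqual2Loop : List (Char × Char) → Option Char → Option Char → Nat → Bool
  | [], _, _, count => count == 2
  | (c1, c2) :: rest, a1, b1, count =>
    if c1 != c2 then
      if count == 0 then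
        areAlmostEqual2Loop rest (some c1) (some c2) (count + 1)
      else if count == 1 then
        -- a2 := s1[i], b2 := s2[i]; if a1 == b2 and a2 == b1: continue else return False
        if a1 == some c2 && some c1 == b1 then
          areAlmostEqual2Loop rest a1 b1 (count + 1)
        else false
      else false
    else
      areAlmostEqual2Loop rest a1 b1 count

def areAlmostEqual2 (s1 : String) (s2 : String) : Bool :=
  if s1.toList.length != s2.toList.length then false
  else if s1 == s2 then true
  else areAlmostEqual2Loop (s1.toList.zip s2.toList) none none 0

-- ===== PORT B =====
-- mismatches = sum(a != b for a, b in zip(s1, s2)); sorted(s) = PySem.List.sorted (stable, no key)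
def areAlmostEqual2_alt (s1 : String) (s2 : String) : Bool :=
  if s1.toList.length != s2.toList.length then false
  else if s1 == s2 then true
  else
    let mismatches := (s1.toList.zip s2.toList).countP (fun p => p.1 != p.2)
    mismatches == 2 &&
      (PySem.List.sorted s1.toList (fun c => c) false == PySem.List.sorted s2.toList (fun c => c) false)

-- ===== PRECONDITION & SPEC =====
def Spec_areAlmostEqual2 (s1 : String) (s2 : String) (out : Bool) : Prop := out = areAlmostEqual2_alt s1 s2
instance (s1 : String) (s2 : String) (out : Bool) : Decidable (Spec_areAlmostEqual2 s1 s2 out) := by unfold Spec_areAlmostEqual2; infer_instance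

-- ===== CLAIM (what is proved, stated in full; the proofs are below) =====
def Claim_equal_areAlmostEqual2 : Prop := ∀ (s1 : String) (s2 : String), Dom_areAlmostEqual2 s1 s2 → Spec_areAlmostEqual2 s1 s2 (areAlmostEqual2 s1 s2)

-- ===== LEMMAS AND PROOFS =====

-- In state count=2 the loop returns true iff no further mismatch occurs.
lemma loop2_eq (l : List (Char × Char)) (a1 b1 : Option Char) :
    areAlmostEqual2Loop l a1 b1 2 = (l.filter (fun p => p.1 != p.2) == []) := by
  induction l with
  | nil => simp [areAlmostEqual2Loop]
  | cons p rest ih =>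
    obtain ⟨c1, c2⟩ := p
    by_cases h : c1 = c2 <;> simp [areAlmostEqual2Loop, h, ih]

-- In state count=1 with a1,b1 recorded, the loop result as a function of the remaining mismatches.
lemma loop1_eq (l : List (Char × Char)) (a b : Char) :
    areAlmostEqual2Loop l (some a) (some b) 1 =
      (match l.filter (fun p => p.1 != p.2) with
       | [(c, d)] => a == d && c == b
       | _ => false) := by
  induction l with
  | nil => simp [areAlmostEqual2Loop]
  | cons p rest ih =>
    obtain ⟨c1, c2⟩ := p
    by_cases h : c1 = c2
    · simp [areAlmostEqual2Loop, h, ih]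
    · by_cases hc : a = c2 ∧ c1 = b
      · obtain ⟨h1, h2⟩ := hc
        subst h1; subst h2
        simp [areAlmostEqual2Loop, h, loop2_eq]
        cases hrest : rest.filter (fun p => p.1 != p.2) <;> simp
      · simp [areAlmostEqual2Loop, h, loop2_eq]
        cases hrest : rest.filter (fun p => p.1 != p.2) with
        | nil => rcases not_and_or.mp hc with hx | hx <;> simp [hx]
        | cons q t => simp

-- In state count=0, the loop result as a function of all mismatches.
lemma loop0_eq (l : List (Char × Char)) :
    areAlmostEqual2Loop l none none 0 =
      (match l.filter (fun p => p.1 != p.2) with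
       | [(a, b), (c, d)] => a == d && c == b
       | _ => false) := by
  induction l with
  | nil => simp [areAlmostEqual2Loop]
  | cons p rest ih =>
    obtain ⟨c1, c2⟩ := p
    by_cases h : c1 = c2
    · simp [areAlmostEqual2Loop, h, ih]
    · simp only [areAlmostEqual2Loop, List.filter_cons]
      simp [h, loop1_eq]
      cases hrest : rest.filter (fun p => p.1 != p.2) with
      | nil => simp
      | cons q t =>
        obtain ⟨c, d⟩ := q
        cases t <;> simp

-- On the matched pairs of the zip, fst and snd agree.
lemma map_fst_eq_map_snd_on_eq (z : List (Char × Char)) :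
    (z.filter (fun p => !(p.1 != p.2))).map Prod.fst
      = (z.filter (fun p => !(p.1 != p.2))).map Prod.snd := by
  apply List.map_congr_left
  intro p hp
  have h := (List.mem_filter.mp hp).2
  simpa using h

-- For equal-length lists, l1 ~ l2 iff the firsts of the mismatched zip pairs
-- are a permutation of their seconds (the matched pairs contribute equally).
lemma perm_iff_mismatch (l1 l2 : List Char) (h : l1.length = l2.length) :
    l1.Perm l2 ↔
      (((l1.zip l2).filter (fun p => p.1 != p.2)).map Prod.fst).Perm
        (((l1.zip l2).filter (fun p => p.1 != p.2)).map Prod.snd) := by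
  have h1 : List.map Prod.fst (l1.zip l2) = l1 := List.map_fst_zip h.le
  have h2 : List.map Prod.snd (l1.zip l2) = l2 := List.map_snd_zip h.ge
  have hp := List.filter_append_perm (fun p : Char × Char => p.1 != p.2) (l1.zip l2)
  have e1 : ((((l1.zip l2).filter (fun p => p.1 != p.2)).map Prod.fst)
      ++ (((l1.zip l2).filter (fun p => !(p.1 != p.2))).map Prod.fst)).Perm l1 := by
    have e := hp.map Prod.fst
    rw [List.map_append] at e
    rw [h1] at e
    exact e
  have e2 : ((((l1.zip l2).filter (fun p => p.1 != p.2)).map Prod.snd)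
      ++ (((l1.zip l2).filter (fun p => !(p.1 != p.2))).map Prod.snd)).Perm l2 := by
    have e := hp.map Prod.snd
    rw [List.map_append] at e
    rw [h2] at e
    exact e
  rw [← map_fst_eq_map_snd_on_eq (l1.zip l2)] at e2
  constructor
  · intro hl
    exact (List.perm_append_right_iff _).mp (e1.trans (hl.trans e2.symm))
  · intro hf
    exact e1.symm.trans (((List.perm_append_right_iff _).mpr hf).trans e2)

-- Two mismatched pairs are cross-equal iff their firsts permute their seconds.
lemma pair_perm_iff (a b c d : Char) (hab : a ≠ b) (hcd : c ≠ d) :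
    ([a, c].Perm [b, d]) ↔ (a = d ∧ c = b) := by
  constructor
  · intro hp
    have hmem : a ∈ [b, d] := hp.mem_iff.mp (by simp)
    have had : a = d := by
      rcases List.mem_cons.mp hmem with h | h
      · exact absurd h hab
      · simpa using h
    subst had
    have hbd : b ≠ a := fun h => hab h.symm
    have herase : ([a, c].erase a).Perm ([b, a].erase a) := hp.erase a
    simp [hbd] at herase
    exact ⟨rfl, herase⟩
  · rintro ⟨rfl, rfl⟩
    exact List.Perm.swap _ _ _

-- ===== VERDICT (by name: the statement is the Claim_ definition above) =====
theorem areAlmostEqual2_spec : Claim_equal_areAlmostEqual2 := by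
  intro s1 s2 _
  unfold Spec_areAlmostEqual2 areAlmostEqual2 areAlmostEqual2_alt
  by_cases hlen : s1.toList.length = s2.toList.length
  · simp only [hlen, bne_self_eq_false, Bool.false_eq_true, if_false]
    by_cases heq : s1 = s2
    · simp [heq]
    · have hne : (s1 == s2) = false := by simp [heq]
      simp only [hne, Bool.false_eq_true, if_false, loop0_eq]
      have hcount : (s1.toList.zip s2.toList).countP (fun p => p.1 != p.2)
          = ((s1.toList.zip s2.toList).filter (fun p => p.1 != p.2)).length := by
        rw [List.countP_eq_length_filter]
      have hsort : (PySem.List.sorted s1.toList (fun c => c) false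
            == PySem.List.sorted s2.toList (fun c => c) false)
          = decide (s1.toList.Perm s2.toList) := by
        by_cases hp : s1.toList.Perm s2.toList
        · have := (PySem.List.sorted_id_eq_sorted_id_iff_perm s1.toList s2.toList).mpr hp
          simp [hp, this]
        · have hne2 : ¬ ((PySem.List.sorted s1.toList (fun c => c) false)
              = PySem.List.sorted s2.toList (fun c => c) false) := fun hc =>
            hp ((PySem.List.sorted_id_eq_sorted_id_iff_perm s1.toList s2.toList).mp hc)
          simp [hp, hne2]
      rw [hsort, hcount]
      cases hfl : (s1.toList.zip s2.toList).filter (fun p => p.1 != p.2) with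
      | nil => simp
      | cons q t =>
        obtain ⟨a, b⟩ := q
        have hab : a ≠ b := by
          have : (a, b) ∈ (s1.toList.zip s2.toList).filter (fun p => p.1 != p.2) := by
            rw [hfl]; simp
          simpa using (List.mem_filter.mp this).2
        cases t with
        | nil => simp
        | cons r t2 =>
          obtain ⟨c, d⟩ := r
          have hcd : c ≠ d := by
            have : (c, d) ∈ (s1.toList.zip s2.toList).filter (fun p => p.1 != p.2) := by
              rw [hfl]; simp
            simpa using (List.mem_filter.mp this).2
          cases t2 with
          | nil =>
            have hiff : s1.toList.Perm s2.toList ↔ (a = d ∧ c = b) := by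
              rw [perm_iff_mismatch _ _ hlen, hfl]
              simpa using pair_perm_iff a b c d hab hcd
            have hdec : decide (s1.toList.Perm s2.toList) = decide (a = d ∧ c = b) :=
              decide_eq_decide.mpr hiff
            rw [hdec]
            by_cases h1 : a = d <;> by_cases h2 : c = b <;> simp [h1, h2]
          | cons _ _ => simp
  · have hlen' : ¬ s1.length = s2.length := by
      rw [← String.length_toList (s := s1), ← String.length_toList (s := s2)]; exact hlen
    simp [hlen']
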